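-- pv_equiv track=rewrite | github.com/mcsltd/ecganncompare | utils/anndistribution.py | _group_dataframes
-- ===== SOURCE A (Python) =====
-- from collections import defaultdict, Counter, OrderedDict, namedtuple
--
-- def _group_dataframes(dataframes, max_sum_group_size=10):
--     # Remade groups order as in thesaurus
--     groups = [OrderedDict()]
--     for name in dataframes:
--         last_group = groups[-1]
--         items_len_sum = sum(len(last_group[n]) for n in last_group)
--         if items_len_sum >= max_sum_group_size:
--             last_group = OrderedDict()
--             groups.append(last_group)
--         last_group[name] = dataframes[name]
--     return groups
-- ===== SOURCE B (Python) =====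
-- from collections import OrderedDict
--
-- def _group_dataframes(dataframes, max_sum_group_size=10):
--     # One pass: keep the running length sum of the current group instead of
--     # re-summing the last group for every name.
--     groups = []
--     current = OrderedDict()
--     running = 0
--     for name, df in dataframes.items():
--         if running >= max_sum_group_size:
--             groups.append(current)
--             current = OrderedDict()
--             running = 0
--         current[name] = df
--         running += len(df)
--     groups.append(current)
--     return groups
-- ===== Notes on version B (the rewrite author's own statement) =====
-- stated objective: faster
-- what changed: B keeps a running sum of the current group's dataframe lengths (reset when a new group starts) instead of re-summing the whole last group for every name, turning the O(n*g) nested scan into a single pass.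
import Mathlib
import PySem

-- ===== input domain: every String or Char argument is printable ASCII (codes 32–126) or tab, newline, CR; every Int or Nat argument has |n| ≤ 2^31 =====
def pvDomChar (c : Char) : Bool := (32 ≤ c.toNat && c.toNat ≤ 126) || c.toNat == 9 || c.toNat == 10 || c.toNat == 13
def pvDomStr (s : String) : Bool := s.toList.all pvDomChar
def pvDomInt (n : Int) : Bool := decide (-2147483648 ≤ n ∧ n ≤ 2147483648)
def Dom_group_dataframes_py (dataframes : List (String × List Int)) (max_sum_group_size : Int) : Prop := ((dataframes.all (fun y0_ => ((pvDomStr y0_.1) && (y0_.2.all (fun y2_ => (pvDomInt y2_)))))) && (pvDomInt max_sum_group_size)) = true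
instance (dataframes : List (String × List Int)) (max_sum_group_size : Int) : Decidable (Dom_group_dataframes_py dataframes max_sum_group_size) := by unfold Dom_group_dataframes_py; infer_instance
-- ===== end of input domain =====

-- B replaces A's per-item re-summation of the last group by a running sum kept
-- across the single pass (objective: faster, asymptotically O(n) vs O(n*g)).

-- ===== PORT A =====
-- A's dict parameter is the PySem.Dict built from the association list;
-- 'for name in dataframes' walks its keys, 'dataframes[name]' is getD (the key is
-- always present, so the default is never used).
def group_dataframes_py (dataframes : List (String × List Int)) (max_sum_group_size : Int) : List (List (String × List Int)) :=
  let d := PySem.Dict.ofList dataframes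
  let groups :=
    d.keys.foldl
      (fun (groups : List (PySem.Dict String (List Int))) name =>
        let last_group := PySem.List.pyGetD groups (-1) PySem.Dict.empty
        let items_len_sum :=
          (last_group.keys.map (fun n => PySem.List.len (last_group.getD n []))).sum
        if items_len_sum ≥ max_sum_group_size then
          groups ++ [PySem.Dict.empty.insert name (d.getD name [])]
        else
          groups.dropLast ++ [last_group.insert name (d.getD name [])])
      [PySem.Dict.empty]
  groups.map (fun g => g.items)

-- ===== PORT B =====
-- state = (finished groups, current group, running length sum)
def group_dataframes_py_alt (dataframes : List (String × List Int)) (max_sum_group_size : Int) : List (List (String × List Int)) :=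
  let d := PySem.Dict.ofList dataframes
  let st :=
    d.items.foldl
      (fun (st : List (PySem.Dict String (List Int)) × PySem.Dict String (List Int) × Int) nv =>
        let st' := if st.2.2 ≥ max_sum_group_size then (st.1 ++ [st.2.1], PySem.Dict.empty, (0 : Int)) else st
        (st'.1, st'.2.1.insert nv.1 nv.2, st'.2.2 + PySem.List.len nv.2))
      ([], PySem.Dict.empty, 0)
  (st.1 ++ [st.2.1]).map (fun g => g.items)

-- ===== PRECONDITION & SPEC =====
def Spec_group_dataframes_py (dataframes : List (String × List Int)) (max_sum_group_size : Int) (out : List (List (String × List Int))) : Prop := out = group_dataframes_py_alt dataframes max_sum_group_size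
instance (dataframes : List (String × List Int)) (max_sum_group_size : Int) (out : List (List (String × List Int))) : Decidable (Spec_group_dataframes_py dataframes max_sum_group_size out) := by unfold Spec_group_dataframes_py; infer_instance

-- ===== CLAIM (what is proved, stated in full; the proofs are below) =====
def Claim_equal_group_dataframes_py : Prop := ∀ (dataframes : List (String × List Int)) (max_sum_group_size : Int), Dom_group_dataframes_py dataframes max_sum_group_size → Spec_group_dataframes_py dataframes max_sum_group_size (group_dataframes_py dataframes max_sum_group_size)

-- ===== LEMMAS AND PROOFS =====
-- the sum A recomputes each iteration
def pvSum (g : PySem.Dict String (List Int)) : Int :=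
  (g.keys.map (fun n => PySem.List.len (g.getD n []))).sum

-- A's loop body, on a (name, value) pair whose value is the dict lookup
def pvStepA (d : PySem.Dict String (List Int)) (max_sum_group_size : Int)
    (groups : List (PySem.Dict String (List Int))) (name : String) : List (PySem.Dict String (List Int)) :=
  let last_group := PySem.List.pyGetD groups (-1) PySem.Dict.empty
  let items_len_sum := (last_group.keys.map (fun n => PySem.List.len (last_group.getD n []))).sum
  if items_len_sum ≥ max_sum_group_size then
    groups ++ [PySem.Dict.empty.insert name (d.getD name [])]
  else
    groups.dropLast ++ [last_group.insert name (d.getD name [])]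

-- B's loop body
def pvStepB (max_sum_group_size : Int)
    (st : List (PySem.Dict String (List Int)) × PySem.Dict String (List Int) × Int)
    (nv : String × List Int) : List (PySem.Dict String (List Int)) × PySem.Dict String (List Int) × Int :=
  let st' := if st.2.2 ≥ max_sum_group_size then (st.1 ++ [st.2.1], PySem.Dict.empty, (0 : Int)) else st
  (st'.1, st'.2.1.insert nv.1 nv.2, st'.2.2 + PySem.List.len nv.2)

lemma pvSum_insert (cur : PySem.Dict String (List Int)) (k : String) (v : List Int)
    (h : cur.contains k = false) :
    pvSum (cur.insert k v) = pvSum cur + PySem.List.len v := by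
  unfold pvSum
  rw [PySem.Dict.keys_insert_of_not_contains cur v h, List.map_append, List.sum_append]
  congr 1
  · congr 1
    apply List.map_congr_left
    intro n hn
    have hne : n ≠ k := by
      intro he; subst he
      have h2 := (PySem.Dict.contains_iff_mem_keys cur n).mpr hn
      rw [h2] at h; exact absurd h (by simp)
    rw [PySem.Dict.getD_insert_of_ne cur v [] hne]
  · simp [PySem.Dict.getD_insert_self]

lemma pv_loop_eq (d : PySem.Dict String (List Int)) (max_sum_group_size : Int) :
    ∀ (l : List (String × List Int)) (gs : List (PySem.Dict String (List Int)))
      (cur : PySem.Dict String (List Int)) (run : Int),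
      run = pvSum cur →
      (∀ p ∈ l, cur.contains p.1 = false) →
      (∀ p ∈ l, d.getD p.1 [] = p.2) →
      (l.map Prod.fst).Nodup →
      l.foldl (fun s p => pvStepA d max_sum_group_size s p.1) (gs ++ [cur]) =
        (let r := l.foldl (pvStepB max_sum_group_size) (gs, cur, run); r.1 ++ [r.2.1]) := by
  intro l
  induction l with
  | nil => intro gs cur run _ _ _ _; rfl
  | cons p l ih =>
    intro gs cur run hrun hfresh hlook hnd
    have hvp : d.getD p.1 [] = p.2 := hlook p (by simp)
    have hcp : cur.contains p.1 = false := hfresh p (by simp)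
    have hndl : (l.map Prod.fst).Nodup := (List.nodup_cons.mp (by simpa using hnd)).2
    have hp1 : p.1 ∉ l.map Prod.fst := (List.nodup_cons.mp (by simpa using hnd)).1
    simp only [List.foldl_cons]
    have hlast : PySem.List.pyGetD (gs ++ [cur]) (-1) PySem.Dict.empty = cur :=
      PySem.List.pyGetD_neg_one_append_singleton gs cur PySem.Dict.empty
    by_cases hge : pvSum cur ≥ max_sum_group_size
    · have hA : pvStepA d max_sum_group_size (gs ++ [cur]) p.1 =
          (gs ++ [cur]) ++ [PySem.Dict.empty.insert p.1 p.2] := by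
        unfold pvStepA
        rw [hlast, hvp]
        simp only [pvSum] at hge
        rw [if_pos hge]
      have hB : pvStepB max_sum_group_size (gs, cur, run) p =
          (gs ++ [cur], PySem.Dict.empty.insert p.1 p.2, 0 + PySem.List.len p.2) := by
        unfold pvStepB
        simp only
        rw [if_pos (by simpa [hrun] using hge)]
      rw [hA, hB]
      apply ih
      · rw [pvSum_insert _ _ _ (PySem.Dict.contains_empty p.1)]
        simp [pvSum, PySem.Dict.keys_empty]
      · intro q hq
        rw [PySem.Dict.contains_insert _ _ _ _]
        have : q.1 ≠ p.1 := by
          intro he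
          exact hp1 (by simpa [he] using List.mem_map_of_mem (f := Prod.fst) hq)
        simp [this, PySem.Dict.contains_empty]
      · intro q hq; exact hlook q (by simp [hq])
      · exact hndl
    · have hA : pvStepA d max_sum_group_size (gs ++ [cur]) p.1 =
          gs ++ [cur.insert p.1 p.2] := by
        unfold pvStepA
        rw [hlast, hvp]
        simp only [pvSum] at hge
        rw [if_neg hge, List.dropLast_concat]
      have hB : pvStepB max_sum_group_size (gs, cur, run) p =
          (gs, cur.insert p.1 p.2, run + PySem.List.len p.2) := by
        unfold pvStepB
        simp only
        rw [if_neg (by simpa [hrun] using hge)]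
      rw [hA, hB]
      apply ih
      · rw [pvSum_insert _ _ _ hcp, hrun]
      · intro q hq
        rw [PySem.Dict.contains_insert _ _ _ _]
        have : q.1 ≠ p.1 := by
          intro he
          exact hp1 (by simpa [he] using List.mem_map_of_mem (f := Prod.fst) hq)
        simp [this, hfresh q (by simp [hq])]
      · intro q hq; exact hlook q (by simp [hq])
      · exact hndl

-- ===== VERDICT (by name: the statement is the Claim_ definition above) =====
theorem group_dataframes_py_spec : Claim_equal_group_dataframes_py := by
  intro dataframes max_sum_group_size _
  unfold Spec_group_dataframes_py group_dataframes_py group_dataframes_py_alt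
  simp only
  set d := PySem.Dict.ofList dataframes with hd
  have hnd : d.keys.Nodup := PySem.Dict.nodup_keys_ofList dataframes
  have hkeys : d.keys = d.items.map Prod.fst := by simp [PySem.Dict.keys]
  congr 1
  rw [hkeys, List.foldl_map]
  have := pv_loop_eq d max_sum_group_size d.items [] PySem.Dict.empty 0
    (by simp [pvSum, PySem.Dict.keys_empty])
    (by intro p _; exact PySem.Dict.contains_empty p.1)
    (by intro p hp; exact PySem.Dict.getD_of_mem_items d (by simpa using hp) hnd [])
    (by rw [← hkeys]; exact hnd)
  simpa [pvStepA, pvStepB] using this
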